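-- pv_equiv track=rewrite | github.com/k4noise/LabStructAnalyzer | backend/labstructanalyzer/services/graders/fixed.py | _is_valid_prefix
-- ===== SOURCE A (Python) =====
-- from typing import Any, Tuple
--
-- def _is_valid_prefix(given_words: Tuple[str, ...], ref_words: Tuple[str, ...]) -> bool:
--     """
--     Проверяет, является ли ответ пользователя допустимым префиксом эталона
--
--     Args:
--         given_words: извлеченные слова из ответа
--         ref_words: извлеченные слова из эталона
--
--     Returns:
--         bool: True, если ответ — допустимый префикс эталона
--     """
--     given_length, ref_length = len(given_words), len(ref_words)
--     if ref_length == 0 or given_length == 0 or given_length < ref_length: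
--         return False
--     for start in range(0, given_length - ref_length + 1):
--         ok = True
--         for i, ref_word in enumerate(ref_words):
--             given_word = given_words[start + i]
--             if not ref_word.startswith(given_word):
--                 ok = False
--                 break
--         if ok:
--             return True
--     return False
-- ===== SOURCE B (Python) =====
-- def _is_valid_prefix(given_words, ref_words):
--     given_length, ref_length = len(given_words), len(ref_words)
--     if ref_length == 0 or given_length == 0 or given_length < ref_length:
--         return False
--     candidates = set(range(given_length - ref_length + 1))
--     for i in range(ref_length):
--         candidates = {s for s in candidates if ref_words[i].startswith(given_words[s + i])}
--         if not candidates: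
--             return False
--     return True
-- ===== Notes on version B (the rewrite author's own statement) =====
-- stated objective: alternative
-- what changed: Replaces the row-major scan that tests each whole window in turn by a column-major sweep that maintains a shrinking set of viable start offsets, pruning all windows simultaneously per reference column and bailing out as soon as no offset survives.
import Mathlib
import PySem

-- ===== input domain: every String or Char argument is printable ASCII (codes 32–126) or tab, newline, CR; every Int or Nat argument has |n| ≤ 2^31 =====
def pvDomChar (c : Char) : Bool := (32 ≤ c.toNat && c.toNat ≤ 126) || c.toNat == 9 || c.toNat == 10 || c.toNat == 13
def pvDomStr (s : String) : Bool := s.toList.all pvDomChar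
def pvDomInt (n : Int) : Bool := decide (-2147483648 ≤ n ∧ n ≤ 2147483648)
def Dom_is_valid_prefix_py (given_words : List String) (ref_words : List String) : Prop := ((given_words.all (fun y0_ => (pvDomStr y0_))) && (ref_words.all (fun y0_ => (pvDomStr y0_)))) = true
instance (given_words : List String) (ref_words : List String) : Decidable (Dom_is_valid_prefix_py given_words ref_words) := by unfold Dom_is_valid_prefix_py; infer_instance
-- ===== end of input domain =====

-- B replaces A's row-major window-by-window scan with a column-major sweep over a shrinking
-- set of viable start offsets (alternative decomposition; same worst-case cost).

-- ===== PORT A =====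
-- row-major: for each start, test the whole window (inner flag+break = .all, outer first-hit return = .any)
def is_valid_prefix_py (given_words : List String) (ref_words : List String) : Bool :=
  if ((ref_words.length : Int) == 0 || (given_words.length : Int) == 0 ||
      (given_words.length : Int) < (ref_words.length : Int)) then false
  else
    (PySem.List.pyRange 0 ((given_words.length : Int) - (ref_words.length : Int) + 1) 1).any
      (fun start =>
        (PySem.List.enumerate ref_words 0).all (fun p =>
          PySem.Str.startswith p.2 (PySem.List.pyGetD given_words (start + p.1) "")))

-- ===== PORT B =====
-- column-major loop of Source B: one recursive step per column i, filtering the candidate starts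
def pvAltGo (given_words ref_words : List String) (ref_length : Int) (i : Int)
    (cands : List Int) : Bool :=
  if h : i < ref_length then
    let cands' := cands.filter (fun s =>
      PySem.Str.startswith (PySem.List.pyGetD ref_words i "")
        (PySem.List.pyGetD given_words (s + i) ""))
    if cands'.isEmpty then false
    else pvAltGo given_words ref_words ref_length (i + 1) cands'
  else true
termination_by (ref_length - i).toNat
decreasing_by omega

def is_valid_prefix_py_alt (given_words : List String) (ref_words : List String) : Bool :=
  if ((ref_words.length : Int) == 0 || (given_words.length : Int) == 0 ||
      (given_words.length : Int) < (ref_words.length : Int)) then false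
  else
    pvAltGo given_words ref_words (ref_words.length : Int) 0
      (PySem.List.pyRange 0 ((given_words.length : Int) - (ref_words.length : Int) + 1) 1)

-- ===== PRECONDITION & SPEC =====
def Spec_is_valid_prefix_py (given_words : List String) (ref_words : List String) (out : Bool) : Prop := out = is_valid_prefix_py_alt given_words ref_words
instance (given_words : List String) (ref_words : List String) (out : Bool) : Decidable (Spec_is_valid_prefix_py given_words ref_words out) := by unfold Spec_is_valid_prefix_py; infer_instance

-- ===== CLAIM (what is proved, stated in full; the proofs are below) =====
def Claim_equal_is_valid_prefix_py : Prop := ∀ (given_words : List String) (ref_words : List String), Dom_is_valid_prefix_py given_words ref_words → Spec_is_valid_prefix_py given_words ref_words (is_valid_prefix_py given_words ref_words)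

-- ===== LEMMAS AND PROOFS =====

-- invariant of B's column loop: on a nonempty candidate list it answers
-- "is there a start in cands whose window matches on every remaining column"
theorem pvAltGo_eq (given_words ref_words : List String) (rl : Int) :
    ∀ (n : Nat) (i : Int) (cands : List Int), (rl - i).toNat = n → cands ≠ [] →
      pvAltGo given_words ref_words rl i cands =
        cands.any (fun s => (PySem.List.pyRange i rl 1).all (fun j =>
          PySem.Str.startswith (PySem.List.pyGetD ref_words j "")
            (PySem.List.pyGetD given_words (s + j) ""))) := by
  intro n
  induction n with
  | zero =>
    intro i cands hn hne
    have hge : rl ≤ i := by omega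
    rw [pvAltGo, dif_neg (by omega), PySem.List.pyRange_one_eq_nil hge]
    simp only [List.all_nil]
    cases cands with
    | nil => exact absurd rfl hne
    | cons a l => simp
  | succ n ih =>
    intro i cands hn hne
    have hlt : i < rl := by omega
    rw [pvAltGo, dif_pos hlt, PySem.List.pyRange_one_cons hlt]
    simp only [List.all_cons]
    rw [show (fun s => PySem.Str.startswith (PySem.List.pyGetD ref_words i "")
          (PySem.List.pyGetD given_words (s + i) "") &&
          (PySem.List.pyRange (i+1) rl 1).all (fun j =>
            PySem.Str.startswith (PySem.List.pyGetD ref_words j "")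
              (PySem.List.pyGetD given_words (s + j) ""))) =
        (fun s => (fun t => PySem.Str.startswith (PySem.List.pyGetD ref_words i "")
          (PySem.List.pyGetD given_words (t + i) "")) s &&
          (fun t => (PySem.List.pyRange (i+1) rl 1).all (fun j =>
            PySem.Str.startswith (PySem.List.pyGetD ref_words j "")
              (PySem.List.pyGetD given_words (t + j) ""))) s) from rfl,
      ← List.any_filter]
    by_cases he : (cands.filter (fun s =>
        PySem.Str.startswith (PySem.List.pyGetD ref_words i "")
          (PySem.List.pyGetD given_words (s + i) ""))) = []
    · rw [he]
      simp
    · rw [if_neg (fun hh => he (List.isEmpty_iff.mp hh))]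
      exact ih (i + 1) _ (by omega) he

-- A's inner enumerate-loop equals the column predicate over an index range
theorem innerA_eq (given_words ref_words : List String) (start : Int) :
    (PySem.List.enumerate ref_words 0).all (fun p =>
        PySem.Str.startswith p.2 (PySem.List.pyGetD given_words (start + p.1) "")) =
      (PySem.List.pyRange 0 (ref_words.length : Int) 1).all (fun j =>
        PySem.Str.startswith (PySem.List.pyGetD ref_words j "")
          (PySem.List.pyGetD given_words (start + j) "")) := by
  rw [PySem.List.enumerate_eq_map_pyRange (d := "")]
  simp [List.all_map, Function.comp_def]

-- ===== VERDICT (by name: the statement is the Claim_ definition above) =====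
theorem is_valid_prefix_py_spec : Claim_equal_is_valid_prefix_py := by
  intro given_words ref_words _
  unfold Spec_is_valid_prefix_py is_valid_prefix_py is_valid_prefix_py_alt
  by_cases hg : ((ref_words.length : Int) == 0 || (given_words.length : Int) == 0 ||
      (given_words.length : Int) < (ref_words.length : Int)) = true
  · rw [if_pos hg, if_pos hg]
  · rw [if_neg hg, if_neg hg]
    have hge : (ref_words.length : Int) ≤ given_words.length := by
      simp only [Bool.or_eq_true, beq_iff_eq, decide_eq_true_eq, not_or] at hg
      omega
    have hnn : (PySem.List.pyRange 0 ((given_words.length : Int) - ref_words.length + 1) 1) ≠ [] := by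
      intro hnil
      have := PySem.List.length_pyRange_one 0 ((given_words.length : Int) - ref_words.length + 1)
      rw [hnil] at this
      simp at this
      omega
    rw [pvAltGo_eq given_words ref_words _ _ 0 _ rfl hnn]
    congr 1
    funext start
    rw [innerA_eq]
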